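-- pv_equiv track=rewrite | github.com/marinos421/passport-ocr-scanner | services/ocr_service.py | _fix_common_mrz_confusions
-- ===== SOURCE A (Python) =====
-- def _fix_common_mrz_confusions(L1: str, L2: str) -> tuple[str,str]:
--     """
--     Light corrections for typical OCR mistakes in numeric fields of L2.
--     Only touch fields that should be digits/<:
--       passport_no(0:9), birth(13:19), expiry(21:27), personal(28:42)
--     """
--     L1 = L1
--     L2 = (L2 + "<"*44)[:44]
--     def fix_digits(s: str):
--         trans = str.maketrans({
--             'O':'0','Q':'0','D':'0',
--             'I':'1','L':'1',
--             'Z':'2',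
--             'S':'5',
--             'B':'8',
--         })
--         return ''.join(ch.translate(trans) if ch.isalpha() else ch for ch in s)
--     parts = list(L2)
--     # passport number
--     parts[0:9]   = list(fix_digits(''.join(parts[0:9])))
--     # birth date YYMMDD
--     parts[13:19] = list(fix_digits(''.join(parts[13:19])))
--     # expiry YYMMDD
--     parts[21:27] = list(fix_digits(''.join(parts[21:27])))
--     # personal number
--     parts[28:42] = list(fix_digits(''.join(parts[28:42])))
--     return L1, ''.join(parts)
-- ===== SOURCE B (Python) =====
-- _TRANS = str.maketrans({
--     'O': '0', 'Q': '0', 'D': '0',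
--     'I': '1', 'L': '1',
--     'Z': '2',
--     'S': '5',
--     'B': '8',
-- })
--
-- # positions of L2 that belong to numeric fields: passport_no, birth, expiry, personal
-- _FIXABLE = frozenset(range(0, 9)) | frozenset(range(13, 19)) | frozenset(range(21, 27)) | frozenset(range(28, 42))
--
--
-- def _fix_common_mrz_confusions(L1: str, L2: str) -> tuple[str, str]:
--     s = (L2 + "<" * 44)[:44]
--     fixed = ''.join(ch.translate(_TRANS) if i in _FIXABLE else ch
--                     for i, ch in enumerate(s))
--     return L1, fixed
-- ===== Notes on version B (the rewrite author's own statement) =====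
-- stated objective: simpler
-- what changed: A slices four numeric fields out of the padded line, runs a guarded translate over each and splices them back; B precomputes the set of fixable positions and rebuilds the line in one enumerated pass, translating a character iff its index is fixable (translate is already the identity on unmapped characters, so the isalpha guard is dropped).
import Mathlib
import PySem

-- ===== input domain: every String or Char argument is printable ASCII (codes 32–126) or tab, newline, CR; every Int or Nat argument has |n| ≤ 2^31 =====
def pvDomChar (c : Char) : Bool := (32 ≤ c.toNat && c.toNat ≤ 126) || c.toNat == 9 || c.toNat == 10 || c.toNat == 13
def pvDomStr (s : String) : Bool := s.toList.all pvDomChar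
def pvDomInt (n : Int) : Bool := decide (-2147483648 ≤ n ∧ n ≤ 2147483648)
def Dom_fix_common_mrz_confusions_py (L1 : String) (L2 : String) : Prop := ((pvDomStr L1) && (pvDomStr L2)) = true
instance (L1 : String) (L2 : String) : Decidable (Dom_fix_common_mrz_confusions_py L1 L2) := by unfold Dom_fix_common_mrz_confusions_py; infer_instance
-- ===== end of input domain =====

-- B replaces A's four list-splicing passes (slice out, translate, splice back) by one
-- indexed pass over the padded line with a precomputed set of fixable positions (objective: simpler).

-- ===== PORT A =====
-- the maketrans table of A's inner fix_digits, as an association dict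
def pvTransA : PySem.Dict Char Char :=
  PySem.Dict.mk [('O','0'),('Q','0'),('D','0'),('I','1'),('L','1'),('Z','2'),('S','5'),('B','8')]

-- fix_digits: ''.join(ch.translate(trans) if ch.isalpha() else ch for ch in s);
-- ch.translate(trans) is the table lookup with ch itself as default
def pvFixDigitsA (s : List Char) : List Char :=
  s.map (fun ch => if PySem.Chars.isalpha ch then PySem.Dict.getD pvTransA ch ch else ch)

-- parts[a:b] = list(fix_digits(''.join(parts[a:b]))): read slice then splice the replacement back in;
-- exact for the constants A uses (0 ≤ a ≤ b ≤ 44 on a 44-element list)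
def pvSpliceA (parts : List Char) (a b : Nat) : List Char :=
  parts.take a ++ pvFixDigitsA ((parts.drop a).take (b - a)) ++ parts.drop b

def fix_common_mrz_confusions_py (L1 : String) (L2 : String) : String × String :=
  let L2p := PySem.List.slice (L2.toList ++ List.replicate 44 '<') none (some 44)  -- (L2 + "<"*44)[:44]
  let parts := L2p
  let parts := pvSpliceA parts 0 9    -- passport number
  let parts := pvSpliceA parts 13 19  -- birth date YYMMDD
  let parts := pvSpliceA parts 21 27  -- expiry YYMMDD
  let parts := pvSpliceA parts 28 42  -- personal number
  (L1, String.ofList parts)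

-- ===== PORT B =====
-- B's module-level translation table (str.maketrans dict)
def pvTransB : PySem.Dict Char Char :=
  PySem.Dict.mk [('O','0'),('Q','0'),('D','0'),('I','1'),('L','1'),('Z','2'),('S','5'),('B','8')]

-- B's frozenset of fixable positions: range(0,9) | range(13,19) | range(21,27) | range(28,42)
def pvFixableB : List Int :=
  PySem.List.pyRange 0 9 1 ++ PySem.List.pyRange 13 19 1 ++
  PySem.List.pyRange 21 27 1 ++ PySem.List.pyRange 28 42 1

def fix_common_mrz_confusions_py_alt (L1 : String) (L2 : String) : String × String :=
  let s := PySem.List.slice (L2.toList ++ List.replicate 44 '<') none (some 44)  -- (L2 + "<"*44)[:44]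
  (L1, String.ofList ((PySem.List.enumerate s).map
        (fun p => if pvFixableB.contains p.1 then PySem.Dict.getD pvTransB p.2 p.2 else p.2)))

-- ===== PRECONDITION & SPEC =====
def Spec_fix_common_mrz_confusions_py (L1 : String) (L2 : String) (out : String × String) : Prop := out = fix_common_mrz_confusions_py_alt L1 L2
instance (L1 : String) (L2 : String) (out : String × String) : Decidable (Spec_fix_common_mrz_confusions_py L1 L2 out) := by unfold Spec_fix_common_mrz_confusions_py; infer_instance

-- ===== CLAIM (what is proved, stated in full; the proofs are below) =====
def Claim_equal_fix_common_mrz_confusions_py : Prop := ∀ (L1 : String) (L2 : String), Dom_fix_common_mrz_confusions_py L1 L2 → Spec_fix_common_mrz_confusions_py L1 L2 (fix_common_mrz_confusions_py L1 L2)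

-- ===== LEMMAS AND PROOFS =====
-- per character: A's guarded translate equals B's bare lookup — the table's keys are all
-- alphabetic and the lookup is the identity on every other character
lemma pvChar_eq (c : Char) :
    (if PySem.Chars.isalpha c then PySem.Dict.getD pvTransA c c else c) = PySem.Dict.getD pvTransB c c := by
  by_cases h1 : c = 'O'; · subst h1; decide
  by_cases h2 : c = 'Q'; · subst h2; decide
  by_cases h3 : c = 'D'; · subst h3; decide
  by_cases h4 : c = 'I'; · subst h4; decide
  by_cases h5 : c = 'L'; · subst h5; decide
  by_cases h6 : c = 'Z'; · subst h6; decide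
  by_cases h7 : c = 'S'; · subst h7; decide
  by_cases h8 : c = 'B'; · subst h8; decide
  have hnone : List.find? (fun p => p.1 == c)
      [('O','0'),('Q','0'),('D','0'),('I','1'),('L','1'),('Z','2'),('S','5'),('B','8')] = none := by
    rw [List.find?_eq_none]
    intro x hx
    fin_cases hx <;> simp only [beq_iff_eq] <;>
      first | exact Ne.symm h1 | exact Ne.symm h2 | exact Ne.symm h3 | exact Ne.symm h4
            | exact Ne.symm h5 | exact Ne.symm h6 | exact Ne.symm h7 | exact Ne.symm h8
  have hA : PySem.Dict.getD pvTransA c c = c := by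
    simp [pvTransA, PySem.Dict.getD, PySem.Dict.get?, hnone]
  have hB : PySem.Dict.getD pvTransB c c = c := by
    simp [pvTransB, PySem.Dict.getD, PySem.Dict.get?, hnone]
  rw [hA, hB]; split <;> rfl

-- core: on any 44-character line, A's splice chain equals B's single indexed pass
set_option maxHeartbeats 3200000 in
lemma pvCore (p : List Char) (h : p.length = 44) :
    pvSpliceA (pvSpliceA (pvSpliceA (pvSpliceA p 0 9) 13 19) 21 27) 28 42 =
    (PySem.List.enumerate p).map
      (fun q => if pvFixableB.contains q.1 then PySem.Dict.getD pvTransB q.2 q.2 else q.2) := by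
  have hfx : pvFixableB =
      [0,1,2,3,4,5,6,7,8,13,14,15,16,17,18,21,22,23,24,25,26,
       28,29,30,31,32,33,34,35,36,37,38,39,40,41] := by decide
  rcases p with _|⟨a0, p⟩; · simp at h
  rcases p with _|⟨a1, p⟩; · simp at h
  rcases p with _|⟨a2, p⟩; · simp at h
  rcases p with _|⟨a3, p⟩; · simp at h
  rcases p with _|⟨a4, p⟩; · simp at h
  rcases p with _|⟨a5, p⟩; · simp at h
  rcases p with _|⟨a6, p⟩; · simp at h
  rcases p with _|⟨a7, p⟩; · simp at h
  rcases p with _|⟨a8, p⟩; · simp at h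
  rcases p with _|⟨a9, p⟩; · simp at h
  rcases p with _|⟨a10, p⟩; · simp at h
  rcases p with _|⟨a11, p⟩; · simp at h
  rcases p with _|⟨a12, p⟩; · simp at h
  rcases p with _|⟨a13, p⟩; · simp at h
  rcases p with _|⟨a14, p⟩; · simp at h
  rcases p with _|⟨a15, p⟩; · simp at h
  rcases p with _|⟨a16, p⟩; · simp at h
  rcases p with _|⟨a17, p⟩; · simp at h
  rcases p with _|⟨a18, p⟩; · simp at h
  rcases p with _|⟨a19, p⟩; · simp at h
  rcases p with _|⟨a20, p⟩; · simp at h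
  rcases p with _|⟨a21, p⟩; · simp at h
  rcases p with _|⟨a22, p⟩; · simp at h
  rcases p with _|⟨a23, p⟩; · simp at h
  rcases p with _|⟨a24, p⟩; · simp at h
  rcases p with _|⟨a25, p⟩; · simp at h
  rcases p with _|⟨a26, p⟩; · simp at h
  rcases p with _|⟨a27, p⟩; · simp at h
  rcases p with _|⟨a28, p⟩; · simp at h
  rcases p with _|⟨a29, p⟩; · simp at h
  rcases p with _|⟨a30, p⟩; · simp at h
  rcases p with _|⟨a31, p⟩; · simp at h
  rcases p with _|⟨a32, p⟩; · simp at h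
  rcases p with _|⟨a33, p⟩; · simp at h
  rcases p with _|⟨a34, p⟩; · simp at h
  rcases p with _|⟨a35, p⟩; · simp at h
  rcases p with _|⟨a36, p⟩; · simp at h
  rcases p with _|⟨a37, p⟩; · simp at h
  rcases p with _|⟨a38, p⟩; · simp at h
  rcases p with _|⟨a39, p⟩; · simp at h
  rcases p with _|⟨a40, p⟩; · simp at h
  rcases p with _|⟨a41, p⟩; · simp at h
  rcases p with _|⟨a42, p⟩; · simp at h
  rcases p with _|⟨a43, p⟩; · simp at h
  rcases p with _|⟨a44, p⟩
  · simp [pvSpliceA, pvFixDigitsA, hfx, PySem.List.enumerate, pvChar_eq]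
  · simp at h

-- the padded line (L2 + "<"*44)[:44] always has exactly 44 characters
lemma pvLen44 (L2 : String) :
    (PySem.List.slice (L2.toList ++ List.replicate 44 '<') none (some 44)).length = 44 := by
  rw [show ((44:Int)) = ((44:Nat):Int) from rfl, PySem.List.slice_to_natCast]
  simp

-- ===== VERDICT (by name: the statement is the Claim_ definition above) =====
theorem fix_common_mrz_confusions_py_spec : Claim_equal_fix_common_mrz_confusions_py := by
  intro L1 L2 _
  unfold Spec_fix_common_mrz_confusions_py fix_common_mrz_confusions_py fix_common_mrz_confusions_py_alt
  exact congrArg (Prod.mk L1) (congrArg String.ofList (pvCore _ (pvLen44 L2)))
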